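-- pv_equiv track=rewrite | github.com/vimarsh244/AutoFL | workloads/SplitCIFAR100.py | create_class_splits
-- ===== SOURCE A (Python) =====
-- def create_class_splits(num_classes=100, num_tasks=10):
--     """create class splits for split cifar100"""
--     classes_per_task = num_classes // num_tasks
--     splits = []
--
--     for task_id in range(num_tasks):
--         start_class = task_id * classes_per_task
--         if task_id == num_tasks - 1:
--             # last task gets remaining classes
--             end_class = num_classes
--         else:
--             end_class = start_class + classes_per_task
--
--         task_classes = list(range(start_class, end_class))
--         splits.append(task_classes)
--
--     return splits
-- ===== SOURCE B (Python) =====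
-- def create_class_splits(num_classes=100, num_tasks=10):
--     """create class splits for split cifar100"""
--     classes_per_task = num_classes // num_tasks
--     rev = []
--     end = num_classes
--     for k in range(num_tasks, 0, -1):
--         start = (k - 1) * classes_per_task
--         rev.append(list(range(start, end)))
--         end = start
--     rev.reverse()
--     return rev
-- ===== Notes on version B (the rewrite author's own statement) =====
-- stated objective: alternative
-- what changed: Builds the splits back-to-front: a countdown loop peels off the last chunk first and threads each chunk's end boundary through the loop state, so the last-task special-case branch disappears; the reversed accumulator is flipped at the end.
import Mathlib
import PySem

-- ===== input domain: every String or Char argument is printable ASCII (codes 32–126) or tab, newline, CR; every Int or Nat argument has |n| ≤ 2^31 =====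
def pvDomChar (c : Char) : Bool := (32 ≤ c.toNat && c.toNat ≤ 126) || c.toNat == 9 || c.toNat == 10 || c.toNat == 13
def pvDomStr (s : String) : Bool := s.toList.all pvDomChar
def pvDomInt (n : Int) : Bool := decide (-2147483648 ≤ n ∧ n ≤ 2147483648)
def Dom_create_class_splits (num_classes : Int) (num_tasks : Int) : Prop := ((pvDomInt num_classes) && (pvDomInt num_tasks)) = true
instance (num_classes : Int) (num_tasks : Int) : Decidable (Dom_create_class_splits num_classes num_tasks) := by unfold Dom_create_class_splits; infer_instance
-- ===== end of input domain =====

-- B builds the splits back-to-front: a countdown loop peels off the last chunk first,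
-- threading each chunk's end boundary through the loop state, so A's last-task branch
-- disappears (alternative decomposition; same cost).

-- ===== PORT A =====
def create_class_splits (num_classes : Int) (num_tasks : Int) : List (List Int) :=
  let classes_per_task := PySem.Int.floordiv num_classes num_tasks
  (PySem.List.pyRange 0 num_tasks 1).foldl
    (fun splits task_id =>
      let start_class := task_id * classes_per_task
      let end_class := if task_id == num_tasks - 1 then num_classes
                       else start_class + classes_per_task
      splits ++ [PySem.List.pyRange start_class end_class 1]) []

-- ===== PORT B =====
def create_class_splits_alt (num_classes : Int) (num_tasks : Int) : List (List Int) :=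
  let classes_per_task := PySem.Int.floordiv num_classes num_tasks
  let st := (PySem.List.pyRange num_tasks 0 (-1)).foldl
    (fun (st : List (List Int) × Int) k =>
      let start := (k - 1) * classes_per_task
      (st.1 ++ [PySem.List.pyRange start st.2 1], start))
    ([], num_classes)
  st.1.reverse

-- ===== PRECONDITION & SPEC =====
-- A (and B) raise ZeroDivisionError exactly when num_tasks = 0.
def Pre_create_class_splits (num_classes : Int) (num_tasks : Int) : Prop := num_tasks ≠ 0
instance (num_classes : Int) (num_tasks : Int) : Decidable (Pre_create_class_splits num_classes num_tasks) := by unfold Pre_create_class_splits; infer_instance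
def pvWitness_create_class_splits : Int × Int := (100, 10)

def Spec_create_class_splits (num_classes : Int) (num_tasks : Int) (out : List (List Int)) : Prop := out = create_class_splits_alt num_classes num_tasks
instance (num_classes : Int) (num_tasks : Int) (out : List (List Int)) : Decidable (Spec_create_class_splits num_classes num_tasks out) := by unfold Spec_create_class_splits; infer_instance

-- ===== CLAIM (what is proved, stated in full; the proofs are below) =====
def Claim_equal_create_class_splits : Prop := ∀ (num_classes : Int) (num_tasks : Int), Dom_create_class_splits num_classes num_tasks → Pre_create_class_splits num_classes num_tasks → Spec_create_class_splits num_classes num_tasks (create_class_splits num_classes num_tasks)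

-- ===== LEMMAS AND PROOFS =====

-- proof-only middle man: the peel-last recursion both programs compute
def pvBuild (cpt : Int) (k : Int) (e : Int) : List (List Int) :=
  if k ≤ 0 then []
  else pvBuild cpt (k - 1) ((k - 1) * cpt) ++ [PySem.List.pyRange ((k - 1) * cpt) e 1]
termination_by k.toNat
decreasing_by omega

-- the non-last chunks of A: mapping the else-branch over range(0, m) equals the
-- recursion with end boundary m*cpt
theorem pvBuild_eq_map (cpt : Int) (m : Nat) :
    (PySem.List.pyRange 0 (m : Int) 1).map
      (fun t => PySem.List.pyRange (t * cpt) (t * cpt + cpt) 1)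
      = pvBuild cpt (m : Int) ((m : Int) * cpt) := by
  induction m with
  | zero =>
    rw [PySem.List.pyRange_one_eq_nil (by omega), pvBuild]
    simp
  | succ n ih =>
    have hsplit : PySem.List.pyRange 0 ((n : Int) + 1) 1
        = PySem.List.pyRange 0 (n : Int) 1 ++ [(n : Int)] :=
      PySem.List.pyRange_one_succ_right (by omega)
    rw [pvBuild]
    push_cast
    rw [hsplit, List.map_append]
    push_cast at ih
    have e1 : ((n : Int) + 1 - 1) = (n : Int) := by ring
    have e2 : ((n : Int) + 1) * cpt = (n : Int) * cpt + cpt := by ring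
    rw [e1, e2, ih, List.map_singleton, if_neg (show ¬ ((n : Int) + 1 ≤ 0) by omega)]

theorem portA_eq_pvBuild (nc nt : Int) (h : 0 < nt) :
    create_class_splits nc nt
      = pvBuild (PySem.Int.floordiv nc nt) nt nc := by
  simp only [create_class_splits]
  set cpt := PySem.Int.floordiv nc nt with hcpt
  rw [PySem.List.foldl_append_singleton_eq_map, List.nil_append]
  have hsplit : PySem.List.pyRange 0 nt 1
      = PySem.List.pyRange 0 (nt - 1) 1 ++ [nt - 1] := by
    have := PySem.List.pyRange_one_succ_right (a := 0) (b := nt - 1) (by omega)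
    simpa using this
  rw [hsplit, List.map_append]
  have hpref : (PySem.List.pyRange 0 (nt - 1) 1).map
        (fun t => PySem.List.pyRange (t * cpt)
          (if t == nt - 1 then nc else t * cpt + cpt) 1)
      = (PySem.List.pyRange 0 (nt - 1) 1).map
        (fun t => PySem.List.pyRange (t * cpt) (t * cpt + cpt) 1) := by
    apply List.map_congr_left
    intro t ht
    have := (PySem.List.mem_pyRange_one).mp ht
    have : (t == nt - 1) = false := by simp; omega
    simp [this]
  rw [hpref]
  have hm : ((nt - 1).toNat : Int) = nt - 1 := by omega
  have hb := pvBuild_eq_map cpt (nt - 1).toNat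
  rw [hm] at hb
  rw [hb]
  conv_rhs => rw [pvBuild]
  rw [if_neg (by omega : ¬ nt ≤ 0)]
  simp

-- the countdown-fold invariant of B: the accumulator collects pvBuild's chunks reversed
theorem portB_fold_inv (cpt : Int) (m : Nat) :
    ∀ (acc : List (List Int)) (e : Int),
      ((PySem.List.pyRange (m : Int) 0 (-1)).foldl
        (fun (st : List (List Int) × Int) k =>
          ((st.1 ++ [PySem.List.pyRange ((k - 1) * cpt) st.2 1], (k - 1) * cpt)))
        (acc, e)).1
      = acc ++ (pvBuild cpt (m : Int) e).reverse := by
  induction m with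
  | zero =>
    intro acc e
    rw [PySem.List.pyRange_neg_one_eq_nil (by omega), pvBuild]
    simp
  | succ n ih =>
    intro acc e
    push_cast
    have hcons : PySem.List.pyRange ((n : Int) + 1) 0 (-1)
        = ((n : Int) + 1) :: PySem.List.pyRange ((n : Int) + 1 - 1) 0 (-1) :=
      PySem.List.pyRange_neg_one_cons (by omega)
    have e1 : ((n : Int) + 1 - 1) = (n : Int) := by ring
    rw [hcons, e1, List.foldl_cons]
    rw [ih]
    conv_rhs => rw [pvBuild]
    rw [if_neg (show ¬ ((n : Int) + 1 ≤ 0) by omega), e1]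
    simp

theorem create_class_splits_ports_agree (nc nt : Int) (h : nt ≠ 0) :
    create_class_splits nc nt = create_class_splits_alt nc nt := by
  rcases lt_or_gt_of_ne h with hneg | hpos
  · simp only [create_class_splits, create_class_splits_alt]
    rw [PySem.List.pyRange_one_eq_nil (by omega),
        PySem.List.pyRange_neg_one_eq_nil (by omega)]
    simp
  · have hm : ((nt.toNat : Int)) = nt := by omega
    have hB := portB_fold_inv (PySem.Int.floordiv nc nt) nt.toNat ([]) nc
    rw [hm] at hB
    simp only [create_class_splits_alt]
    rw [hB]
    simp [portA_eq_pvBuild nc nt hpos]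

-- ===== VERDICT (by name: the statement is the Claim_ definition above) =====
theorem create_class_splits_spec : Claim_equal_create_class_splits := by
  intro nc nt _ hpre
  exact create_class_splits_ports_agree nc nt hpre
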